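-- pv_equiv track=rewrite | github.com/bcloutier412/Cryptit | utilsFile.py | create_encrytion_actions_tasks
-- ===== SOURCE A (Python) =====
-- def create_encrytion_actions_tasks(key_buckets, num_of_encryption_actions):
--     """
--     Creates a list of encryption tasks based on the distribution of the key buckets.
--
--     The function iterates over the key buckets (representing actions) and creates a list
--     of tasks where each task has a modulo-based assignment. It continues processing
--     until all tasks are done.
--
--     Args:
--         key_buckets (list[int]): A list of integers representing the distribution of encryption operations.
--
--     Returns:
--         list[dict]: A list of dictionaries representing the encryption tasks and their modulo-based assignments.
--     """
--     encrytion_actions_list = []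
--     pointer = 0
--     has_done_operation_in_this_iteration = False
--
--     while True:
--         if key_buckets[pointer] > 0:
--             encrytion_actions_list.append({"task": pointer % num_of_encryption_actions, "value": key_buckets[pointer]})
--             key_buckets[pointer] -= 1
--             has_done_operation_in_this_iteration = True
--
--         if pointer == len(key_buckets) - 1:
--             if has_done_operation_in_this_iteration is False:
--                 return encrytion_actions_list
--
--             pointer = 0
--             has_done_operation_in_this_iteration = False
--         else:
--             pointer += 1
-- ===== SOURCE B (Python) =====
-- def create_encrytion_actions_tasks(key_buckets, num_of_encryption_actions):
--     # Closed-form rewrite: pass k (k = 0..max-1) emits, in index order, one task per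
--     # bucket still positive after k decrements; unlike A it does not mutate key_buckets
--     # (return-value equivalence only).
--     m = max(key_buckets, default=0)
--     return [{"task": i % num_of_encryption_actions, "value": v - k}
--             for k in range(m)
--             for i, v in enumerate(key_buckets)
--             if v - k > 0]
-- ===== Notes on version B (the rewrite author's own statement) =====
-- stated objective: simpler
-- what changed: A's stateful while-loop (pointer, per-iteration flag, in-place decrements of key_buckets) is replaced by a closed-form comprehension: pass k = 0..max(key_buckets)-1 emits, in index order, one task per bucket whose value exceeds k, with value v-k; B does not mutate key_buckets.
import Mathlib
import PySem

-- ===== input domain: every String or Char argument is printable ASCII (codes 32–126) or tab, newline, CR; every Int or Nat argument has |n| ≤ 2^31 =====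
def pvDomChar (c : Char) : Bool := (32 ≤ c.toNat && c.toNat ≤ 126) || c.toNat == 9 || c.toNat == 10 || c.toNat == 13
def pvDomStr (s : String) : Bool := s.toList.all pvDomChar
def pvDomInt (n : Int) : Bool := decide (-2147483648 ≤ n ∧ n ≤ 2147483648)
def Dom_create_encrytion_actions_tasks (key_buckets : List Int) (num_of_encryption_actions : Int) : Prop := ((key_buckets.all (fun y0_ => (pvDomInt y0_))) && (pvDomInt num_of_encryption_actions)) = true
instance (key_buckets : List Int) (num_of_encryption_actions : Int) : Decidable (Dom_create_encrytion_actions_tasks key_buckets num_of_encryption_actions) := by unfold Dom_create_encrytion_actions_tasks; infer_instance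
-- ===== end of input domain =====

-- B replaces A's mutating multi-pass while-loop by a closed-form comprehension over pass
-- numbers 0..max-1 (objective: simpler). A mutates key_buckets in place (positive entries
-- are zeroed); B does not — the equivalence proved here is about the RETURN value only.

-- ===== PORT A =====
-- measure used by the while-loop's termination argument (cited by pvLoopA's decreasing_by)
def pvPosSum (bs : List Int) : Nat := (bs.map Int.toNat).sum

theorem pvPosSum_set_lt (bs : List Int) (p : Nat) (h : p < bs.length) (hv : 0 < bs[p]) :
    pvPosSum (bs.set p (bs[p] - 1)) < pvPosSum bs := by
  induction bs generalizing p with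
  | nil => simp at h
  | cons x t ih =>
    cases p with
    | zero => simp only [List.getElem_cons_zero] at hv; simp [pvPosSum]; omega
    | succ q =>
      have hq : q < t.length := by simpa using h
      have hv' : 0 < t[q] := by simpa using hv
      have := ih q hq hv'
      simp only [pvPosSum, List.set_cons_succ, List.map_cons, List.sum_cons,
        List.getElem_cons_succ] at *
      omega

-- the 'while True' loop of A: state = (key_buckets, pointer, has_done_operation_in_this_iteration, result list)
def pvLoopA (bs : List Int) (p : Nat) (flag : Bool)
    (acc : List (List (String × Int))) (num : Int) : List (List (String × Int)) :=
  if h : p < bs.length then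
    if hv : 0 < bs[p] then
      -- append {"task": pointer % num, "value": key_buckets[pointer]}; key_buckets[pointer] -= 1; flag := True
      let acc' := acc ++ [[("task", PySem.Int.mod (p : Int) num), ("value", bs[p])]]
      let bs' := bs.set p (bs[p] - 1)
      if p = bs.length - 1 then
        pvLoopA bs' 0 false acc' num      -- flag is True here, so the loop restarts
      else
        pvLoopA bs' (p + 1) true acc' num
    else
      if p = bs.length - 1 then
        if flag then pvLoopA bs 0 false acc num else acc
      else
        pvLoopA bs (p + 1) flag acc num
  else acc  -- unreachable under Pre_ (Python raises IndexError on an empty list)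
termination_by (pvPosSum bs, (if flag then 1 else 0), bs.length - p)
decreasing_by
  · exact Prod.Lex.left _ _ (pvPosSum_set_lt bs p h hv)
  · exact Prod.Lex.left _ _ (pvPosSum_set_lt bs p h hv)
  · exact Prod.Lex.right _ (Prod.Lex.left _ _ (by simp_all))
  · exact Prod.Lex.right _ (Prod.Lex.right _ (by omega))

def create_encrytion_actions_tasks (key_buckets : List Int) (num_of_encryption_actions : Int) : List (List (String × Int)) :=
  pvLoopA key_buckets 0 false [] num_of_encryption_actions

-- ===== PORT B =====
def create_encrytion_actions_tasks_alt (key_buckets : List Int) (num_of_encryption_actions : Int) : List (List (String × Int)) :=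
  let m := PySem.List.maxD key_buckets (fun v => v) 0   -- max(key_buckets, default=0)
  (PySem.List.pyRange 0 m 1).flatMap (fun k =>
    (PySem.List.enumerate key_buckets).filterMap (fun iv =>
      if iv.2 - k > 0 then
        some [("task", PySem.Int.mod iv.1 num_of_encryption_actions), ("value", iv.2 - k)]
      else none))

-- ===== PRECONDITION & SPEC =====
-- Pre_ excludes exactly the inputs where Python A raises: the empty list (IndexError on
-- key_buckets[0]) and num = 0 with some positive bucket (ZeroDivisionError on pointer % 0).
def Pre_create_encrytion_actions_tasks (key_buckets : List Int) (num_of_encryption_actions : Int) : Prop :=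
  key_buckets ≠ [] ∧ (num_of_encryption_actions ≠ 0 ∨ ∀ v ∈ key_buckets, v ≤ 0)
instance (key_buckets : List Int) (num_of_encryption_actions : Int) : Decidable (Pre_create_encrytion_actions_tasks key_buckets num_of_encryption_actions) := by unfold Pre_create_encrytion_actions_tasks; infer_instance

def pvWitness_create_encrytion_actions_tasks : List Int × Int := ([2, 0, 1], 2)

def Spec_create_encrytion_actions_tasks (key_buckets : List Int) (num_of_encryption_actions : Int) (out : List (List (String × Int))) : Prop := out = create_encrytion_actions_tasks_alt key_buckets num_of_encryption_actions
instance (key_buckets : List Int) (num_of_encryption_actions : Int) (out : List (List (String × Int))) : Decidable (Spec_create_encrytion_actions_tasks key_buckets num_of_encryption_actions out) := by unfold Spec_create_encrytion_actions_tasks; infer_instance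

-- ===== CLAIM (what is proved, stated in full; the proofs are below) =====
def Claim_equal_create_encrytion_actions_tasks : Prop := ∀ (key_buckets : List Int) (num_of_encryption_actions : Int), Dom_create_encrytion_actions_tasks key_buckets num_of_encryption_actions → Pre_create_encrytion_actions_tasks key_buckets num_of_encryption_actions → Spec_create_encrytion_actions_tasks key_buckets num_of_encryption_actions (create_encrytion_actions_tasks key_buckets num_of_encryption_actions)

-- ===== LEMMAS AND PROOFS =====

def pvEntry (i v num : Int) : List (String × Int) := [("task", PySem.Int.mod i num), ("value", v)]

def pvDec (bs : List Int) : List Int := bs.map (fun v => if 0 < v then v - 1 else v)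

-- the entries one pass of A's loop emits from pointer position p to the end
def pvPassFrom (p : Nat) (bs : List Int) (num : Int) : List (List (String × Int)) :=
  (PySem.List.enumerate (bs.drop p) p).filterMap
    (fun iv => if 0 < iv.2 then some (pvEntry iv.1 iv.2 num) else none)

-- the entries B's pass k emits
def pvPass (k : Int) (bs : List Int) (num : Int) : List (List (String × Int)) :=
  (PySem.List.enumerate bs).filterMap
    (fun iv => if 0 < iv.2 - k then some (pvEntry iv.1 (iv.2 - k) num) else none)

def pvAltN (bs : List Int) (num : Int) (t : Nat) : List (List (String × Int)) :=
  (List.range t).flatMap (fun (j : Nat) => pvPass (Int.ofNat j) bs num)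

theorem pvScan : ∀ (n : Nat) (bs : List Int) (num : Int) (p : Nat) (flag : Bool)
    (acc : List (List (String × Int))), bs.length - p = n → p < bs.length →
    pvLoopA bs p flag acc num =
      if flag || (bs.drop p).any (fun v => decide (0 < v)) then
        pvLoopA (bs.take p ++ pvDec (bs.drop p)) 0 false (acc ++ pvPassFrom p bs num) num
      else acc := by
  intro n
  induction n with
  | zero => intro bs num p flag acc hn hp; omega
  | succ n ih =>
    intro bs num p flag acc hn hp
    have hdrop : bs.drop p = bs[p] :: bs.drop (p + 1) := (List.getElem_cons_drop hp).symm
    have htake : bs.take (p + 1) = bs.take p ++ [bs[p]] := by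
      rw [List.take_add_one, List.getElem?_eq_getElem hp]; rfl
    have hpf : pvPassFrom p bs num =
        (if 0 < bs[p] then [pvEntry (p : Int) bs[p] num] else []) ++ pvPassFrom (p + 1) bs num := by
      unfold pvPassFrom
      rw [hdrop, PySem.List.enumerate_cons, List.filterMap_cons]
      have : ((p : Int) + 1) = ((p + 1 : Nat) : Int) := by push_cast; ring
      rw [this]
      split_ifs <;> simp
    rw [pvLoopA, dif_pos hp]
    by_cases hv : 0 < bs[p]
    · rw [dif_pos hv]
      have hcond : (flag || (bs.drop p).any (fun v => decide (0 < v))) = true := by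
        simp only [Bool.or_eq_true, List.any_eq_true]
        exact Or.inr ⟨bs[p], by rw [hdrop]; exact List.mem_cons_self, by simpa using hv⟩
      rw [hcond, if_pos rfl]
      by_cases hl : p = bs.length - 1
      · rw [if_pos hl]
        have h1 : p + 1 = bs.length := by omega
        have hdropnil : bs.drop (p + 1) = [] := by rw [h1, List.drop_length]
        have hpf0 : pvPassFrom (p + 1) bs num = [] := by
          unfold pvPassFrom; rw [hdropnil]; rfl
        have hdecdrop : pvDec (bs.drop p) = [bs[p] - 1] := by
          rw [hdrop, hdropnil]; simp only [pvDec, List.map_cons, List.map_nil, if_pos hv]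
        rw [List.set_eq_take_append_cons_drop, if_pos hp, hdropnil]
        rw [hpf, if_pos hv, hpf0, hdecdrop]
        simp [pvEntry]
      · rw [if_neg hl]
        have h1 : p + 1 < bs.length := by omega
        have hlen' : (bs.set p (bs[p] - 1)).length = bs.length := by simp
        have hih := ih (bs.set p (bs[p] - 1)) num (p + 1) true
          (acc ++ [[("task", PySem.Int.mod (p : Int) num), ("value", bs[p])]])
          (by rw [hlen']; omega) (by rw [hlen']; omega)
        rw [hih]
        have hdropset : (bs.set p (bs[p] - 1)).drop (p + 1) = bs.drop (p + 1) := by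
          rw [List.drop_set, if_pos (by omega)]
        have htakeset : (bs.set p (bs[p] - 1)).take (p + 1) = bs.take p ++ [bs[p] - 1] := by
          rw [List.set_eq_take_append_cons_drop, if_pos hp]
          rw [List.take_append, List.take_take]
          simp [Nat.min_eq_left hp.le, List.length_take]
        have hpfset : pvPassFrom (p + 1) (bs.set p (bs[p] - 1)) num = pvPassFrom (p + 1) bs num := by
          unfold pvPassFrom; rw [hdropset]
        have hdecdrop : pvDec (bs.drop p) = (bs[p] - 1) :: pvDec (bs.drop (p + 1)) := by
          rw [hdrop]; simp only [pvDec, List.map_cons, if_pos hv]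
        rw [Bool.true_or, if_pos rfl, hdropset, htakeset, hpfset]
        rw [hpf, if_pos hv, hdecdrop]
        simp [pvEntry]
    · rw [dif_neg hv]
      by_cases hl : p = bs.length - 1
      · rw [if_pos hl]
        have h1 : p + 1 = bs.length := by omega
        have hdropnil : bs.drop (p + 1) = [] := by rw [h1, List.drop_length]
        have hpf0 : pvPassFrom (p + 1) bs num = [] := by
          unfold pvPassFrom; rw [hdropnil]; rfl
        have hcond : (flag || (bs.drop p).any (fun v => decide (0 < v))) = flag := by
          rw [hdrop, hdropnil]; simp [hv]
        rw [hcond]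
        have hrestore : bs.take p ++ pvDec (bs.drop p) = bs := by
          have : pvDec (bs.drop p) = [bs[p]] := by
            rw [hdrop, hdropnil]; simp only [pvDec, List.map_cons, List.map_nil, if_neg hv]
          rw [this]
          conv_rhs => rw [← List.take_append_drop p bs]
          rw [hdrop, hdropnil]
        cases flag with
        | false => simp
        | true =>
          rw [if_pos rfl, hrestore]
          rw [hpf, if_neg hv, hpf0]
          simp
      · rw [if_neg hl]
        have hih := ih bs num (p + 1) flag acc (by omega) (by omega)
        rw [hih]
        have hcond : (flag || (bs.drop p).any (fun v => decide (0 < v)))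
            = (flag || (bs.drop (p+1)).any (fun v => decide (0 < v))) := by
          rw [hdrop, List.any_cons, decide_eq_false hv]; simp
        have htd : bs.take (p+1) ++ pvDec (bs.drop (p+1)) = bs.take p ++ pvDec (bs.drop p) := by
          rw [htake, hdrop]
          have : pvDec (bs[p] :: bs.drop (p+1)) = bs[p] :: pvDec (bs.drop (p+1)) := by
            simp only [pvDec, List.map_cons, if_neg hv]
          rw [this, List.append_assoc]; rfl
        have hpf' : pvPassFrom (p+1) bs num = pvPassFrom p bs num := by
          rw [hpf, if_neg hv]; rfl
        rw [hcond, htd, hpf']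


theorem pvLoop_pass (bs : List Int) (num : Int) (acc : List (List (String × Int)))
    (hne : bs ≠ []) :
    pvLoopA bs 0 false acc num =
      if bs.any (fun v => decide (0 < v)) then
        pvLoopA (pvDec bs) 0 false (acc ++ pvPassFrom 0 bs num) num
      else acc := by
  have hp : 0 < bs.length := List.length_pos_iff.mpr hne
  simpa using pvScan (bs.length - 0) bs num 0 false acc rfl hp

theorem pvPass_shift_aux (k : Int) (hk : 0 ≤ k) (bs : List Int) (num : Int) : ∀ (s : Int),
    (PySem.List.enumerate bs s).filterMap
      (fun iv => if 0 < iv.2 - (k+1) then some (pvEntry iv.1 (iv.2 - (k+1)) num) else none) =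
    (PySem.List.enumerate (pvDec bs) s).filterMap
      (fun iv => if 0 < iv.2 - k then some (pvEntry iv.1 (iv.2 - k) num) else none) := by
  induction bs with
  | nil => intro s; simp [pvDec]
  | cons x t ih =>
    intro s
    simp only [pvDec, List.map_cons, PySem.List.enumerate_cons, List.filterMap_cons]
    rw [show (pvDec t = t.map (fun v => if 0 < v then v - 1 else v)) from rfl] at ih
    rw [← ih (s+1)]
    by_cases hx : 0 < x
    · simp only [if_pos hx]
      have : x - (k+1) = x - 1 - k := by ring
      rw [this]
    · simp only [if_neg hx]
      have h1 : ¬ 0 < x - (k+1) := by omega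
      have h2 : ¬ 0 < x - k := by omega
      rw [if_neg h1, if_neg h2]

theorem pvPass_shift (j : Nat) (bs : List Int) (num : Int) :
    pvPass ((j : Int) + 1) bs num = pvPass (j : Int) (pvDec bs) num := by
  exact pvPass_shift_aux (j : Int) (Int.natCast_nonneg j) bs num 0

theorem pvPass_zero (bs : List Int) (num : Int) :
    pvPass 0 bs num = pvPassFrom 0 bs num := by
  simp [pvPass, pvPassFrom]

theorem pvPass_empty (k : Int) (bs : List Int) (num : Int) (hk : 0 ≤ k)
    (h : ∀ v ∈ bs, v ≤ 0) : pvPass k bs num = [] := by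
  unfold pvPass
  rw [List.filterMap_eq_nil_iff]
  intro iv hiv
  obtain ⟨i, hi, rfl⟩ := (PySem.List.mem_enumerate_iff _ _ _).mp hiv
  have := h _ (List.getElem_mem hi)
  simp only [if_neg (by omega : ¬ (0:Int) < bs[i] - k)]

theorem pvAltN_nil (bs : List Int) (num : Int) (t : Nat) (h : ∀ v ∈ bs, v ≤ 0) :
    pvAltN bs num t = [] := by
  unfold pvAltN
  rw [List.flatMap_eq_nil_iff]
  intro j _
  exact pvPass_empty _ bs num (Int.natCast_nonneg j) h

theorem pvAltN_succ (bs : List Int) (num : Int) (t : Nat) :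
    pvAltN bs num (t + 1) = pvPass 0 bs num ++ pvAltN (pvDec bs) num t := by
  unfold pvAltN
  rw [List.range_succ_eq_map, List.flatMap_cons, List.flatMap_map]
  congr 1
  apply List.flatMap_congr
  intro j _
  show pvPass (Int.ofNat (j + 1)) bs num = pvPass (Int.ofNat j) (pvDec bs) num
  have : (Int.ofNat (j + 1)) = (j : Int) + 1 := by simp
  rw [this]
  exact pvPass_shift j bs num

theorem pvMain : ∀ (t : Nat) (bs : List Int) (acc : List (List (String × Int))) (num : Int),
    bs ≠ [] → (∀ v ∈ bs, v ≤ (t : Int)) →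
    pvLoopA bs 0 false acc num = acc ++ pvAltN bs num t := by
  intro t
  induction t with
  | zero =>
    intro bs acc num hne hb
    rw [pvLoop_pass bs num acc hne]
    have hno : bs.any (fun v => decide (0 < v)) = false := by
      rw [List.any_eq_false]
      intro v hv
      have := hb v hv
      simpa using (by omega : ¬ (0:Int) < v)
    rw [hno]
    rw [pvAltN_nil bs num 0 (fun v hv => by have := hb v hv; exact_mod_cast this)]
    simp
  | succ t ih =>
    intro bs acc num hne hb
    by_cases hpos : bs.any (fun v => decide (0 < v)) = true
    · rw [pvLoop_pass bs num acc hne, hpos, if_pos rfl]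
      have hdne : pvDec bs ≠ [] := by
        intro h
        exact hne (List.map_eq_nil_iff.mp h)
      have hdb : ∀ v ∈ pvDec bs, v ≤ (t : Int) := by
        intro v hv
        obtain ⟨w, hw, rfl⟩ := List.mem_map.mp hv
        have := hb w hw
        push_cast at *
        split_ifs <;> omega
      rw [ih (pvDec bs) (acc ++ pvPassFrom 0 bs num) num hdne hdb]
      rw [pvAltN_succ, pvPass_zero]
      simp
    · rw [pvLoop_pass bs num acc hne, if_neg hpos]
      have hall : ∀ v ∈ bs, v ≤ 0 := by
        rw [Bool.not_eq_true, List.any_eq_false] at hpos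
        intro v hv
        have := hpos v hv
        simp only [decide_eq_true_eq] at this
        omega
      rw [pvAltN_nil bs num _ hall]
      simp

theorem pvAlt_eq_altN (bs : List Int) (num : Int) :
    create_encrytion_actions_tasks_alt bs num =
      pvAltN bs num (PySem.List.maxD bs (fun v => v) 0).toNat := by
  unfold create_encrytion_actions_tasks_alt pvAltN
  show (PySem.List.pyRange 0 (PySem.List.maxD bs (fun v => v) 0)).flatMap _ = _
  rw [PySem.List.pyRange_one, List.flatMap_map]
  simp only [sub_zero, zero_add]
  apply List.flatMap_congr
  intro j _
  simp [pvPass, pvEntry]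

theorem pvMaxD_bound (bs : List Int) (hne : bs ≠ []) :
    ∀ v ∈ bs, v ≤ ((PySem.List.maxD bs (fun v => v) 0).toNat : Int) := by
  intro v hv
  cases hmax : PySem.List.max? bs (fun v => v) with
  | none => exact absurd ((PySem.List.max?_eq_none_iff _ _).mp hmax) hne
  | some m =>
    have hle : v ≤ m := PySem.List.max?_isMax hmax v hv
    have : PySem.List.maxD bs (fun v => v) 0 = m := by
      unfold PySem.List.maxD; rw [hmax]; rfl
    rw [this]
    exact le_trans hle (Int.self_le_toNat m)

-- ===== VERDICT (by name: the statement is the Claim_ definition above) =====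
theorem create_encrytion_actions_tasks_spec : Claim_equal_create_encrytion_actions_tasks := by
  intro bs num _ hpre
  obtain ⟨hne, -⟩ := hpre
  unfold Spec_create_encrytion_actions_tasks create_encrytion_actions_tasks
  rw [pvAlt_eq_altN]
  simpa using pvMain (PySem.List.maxD bs (fun v => v) 0).toNat bs [] num hne
    (pvMaxD_bound bs hne)
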